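-- pv_equiv track=rewrite | github.com/RobbieSoutham/DiD-Study | did_study/helpers/preparation.py | _em_map_is_partition
-- ===== SOURCE A (Python) =====
-- from typing import Any, Dict, Tuple, List, Optional
--
-- def _em_map_is_partition(emap: Dict[str, set]) -> bool:
--     """True iff each emissions sector maps to exactly one CCUS sector."""
--     seen: Dict[str, str] = {}
--     for ccus, es in (emap or {}).items():
--         for e in set(es):
--             if e in seen and seen[e] != ccus:
--                 return False
--             seen[e] = ccus
--     return True
-- ===== SOURCE B (Python) =====
-- def _em_map_is_partition(emap):
--     """True iff each emissions sector maps to exactly one CCUS sector."""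
--     union = set()
--     total = 0
--     for es in (emap or {}).values():
--         s = set(es)
--         union |= s
--         total += len(s)
--         if len(union) != total:
--             return False
--     return True
-- ===== Notes on version B (the rewrite author's own statement) =====
-- stated objective: alternative
-- what changed: Replaces the element-to-ccus dict with per-element membership tests by a running union of the deduplicated value-sets plus a running size count, returning False as soon as the union's cardinality falls behind the sum of set sizes (an overlap).
import Mathlib
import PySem

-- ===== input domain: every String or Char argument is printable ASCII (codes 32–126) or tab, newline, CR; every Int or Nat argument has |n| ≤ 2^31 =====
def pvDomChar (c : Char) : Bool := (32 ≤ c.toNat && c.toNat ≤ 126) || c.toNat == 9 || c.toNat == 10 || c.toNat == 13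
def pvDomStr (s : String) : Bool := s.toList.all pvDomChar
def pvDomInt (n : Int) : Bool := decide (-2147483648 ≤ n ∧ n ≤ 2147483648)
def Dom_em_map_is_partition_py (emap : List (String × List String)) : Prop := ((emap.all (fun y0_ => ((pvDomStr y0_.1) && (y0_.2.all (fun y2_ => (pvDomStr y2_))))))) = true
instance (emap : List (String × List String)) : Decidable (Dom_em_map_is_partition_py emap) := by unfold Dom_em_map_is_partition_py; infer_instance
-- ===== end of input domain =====

-- B replaces the element→ccus "seen" dict by a running union of the deduplicated
-- value-sets plus a running size total (overlap ⇔ cardinality mismatch); alternative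
-- decomposition of the same O(n) check. Pre_ excludes duplicate CCUS keys, where the
-- association list is an ambiguous representation of the Python dict.


-- ===== PORT A =====
-- one step of the inner 'for e in set(es)' loop: 'if e in seen and seen[e] != ccus: return False; seen[e] = ccus'
-- (none = the early 'return False' has fired)
def pvAStep (ccus : String) (acc : Option (PySem.Dict String String)) (e : String) :
    Option (PySem.Dict String String) :=
  match acc with
  | none => none
  | some seen =>
    match seen.get? e with
    | some v => if v ≠ ccus then none else some (seen.insert e ccus)
    | none => some (seen.insert e ccus)

-- outer loop 'for ccus, es in (emap or {}).items()'
def pvAOuter : List (String × List String) → PySem.Dict String String → Bool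
  | [], _ => true
  | (ccus, es) :: rest, seen =>
    match (PySem.Set.ofList es).foldl (pvAStep ccus) (some seen) with
    | none => false
    | some seen' => pvAOuter rest seen'

def em_map_is_partition_py (emap : List (String × List String)) : Bool :=
  pvAOuter emap PySem.Dict.empty

-- ===== PORT B =====
-- 'for es in (emap or {}).values(): s = set(es); union |= s; total += len(s); if len(union) != total: return False'
def pvBGo : List (String × List String) → PySem.Set String → Int → Bool
  | [], _, _ => true
  | (_, es) :: rest, union, total =>
    let s : PySem.Set String := PySem.Set.ofList es
    let union' := PySem.Set.union union s
    let total' := total + PySem.Set.len s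
    if PySem.Set.len union' ≠ total' then false else pvBGo rest union' total'

def em_map_is_partition_py_alt (emap : List (String × List String)) : Bool :=
  pvBGo emap PySem.Set.empty 0

-- ===== PRECONDITION & SPEC =====
-- Pre_ excludes association lists with duplicate CCUS keys: there the list is an ambiguous
-- representation of the Python dict argument (a dict collapses duplicate keys), so the
-- ports' behaviour on such lists is accidental.
def Pre_em_map_is_partition_py (emap : List (String × List String)) : Prop :=
  (emap.map Prod.fst).Nodup
instance (emap : List (String × List String)) : Decidable (Pre_em_map_is_partition_py emap) := by
  unfold Pre_em_map_is_partition_py; infer_instance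

def pvWitness_em_map_is_partition_py : (List (String × List String)) :=
  [("power", ["coal", "gas"]), ("industry", ["steel"])]

def Spec_em_map_is_partition_py (emap : List (String × List String)) (out : Bool) : Prop := out = em_map_is_partition_py_alt emap
instance (emap : List (String × List String)) (out : Bool) : Decidable (Spec_em_map_is_partition_py emap out) := by unfold Spec_em_map_is_partition_py; infer_instance

-- ===== CLAIM (what is proved, stated in full; the proofs are below) =====
def Claim_equal_em_map_is_partition_py : Prop := ∀ (emap : List (String × List String)), Dom_em_map_is_partition_py emap → Pre_em_map_is_partition_py emap → Spec_em_map_is_partition_py emap (em_map_is_partition_py emap)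

-- ===== LEMMAS AND PROOFS =====

lemma pvAStep_none (ccus : String) (l : List String) :
    l.foldl (pvAStep ccus) none = none := by
  induction l with
  | nil => rfl
  | cons e l ih => simpa [pvAStep] using ih

-- values of the insert loop: at most the old values plus ccus
lemma pvValues_foldl_insert (ccus : String) (l : List String)
    (seen : PySem.Dict String String) :
    ∀ v ∈ (l.foldl (fun d e => d.insert e ccus) seen).values, v ∈ seen.values ∨ v = ccus := by
  induction l generalizing seen with
  | nil => intro v hv; exact Or.inl hv
  | cons e l ih =>
    intro v hv
    rcases ih (seen.insert e ccus) v hv with h | h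
    · rcases PySem.Dict.mem_values_insert seen e ccus v h with h | h
      · exact Or.inr h
      · exact Or.inl h
    · exact Or.inr h

-- the inner loop characterised on a duplicate-free list whose elements never map to ccus
lemma pvAInner (ccus : String) (l : List String) (seen : PySem.Dict String String)
    (hnd : l.Nodup)
    (hv : ∀ e ∈ l, ∀ v, seen.get? e = some v → v ≠ ccus) :
    l.foldl (pvAStep ccus) (some seen) =
      if l.all (fun e => !seen.contains e) then
        some (l.foldl (fun d e => d.insert e ccus) seen)
      else none := by
  induction l generalizing seen with
  | nil => simp
  | cons e l ih =>
    rcases List.nodup_cons.mp hnd with ⟨he, hnd'⟩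
    by_cases hc : seen.contains e = true
    · -- e already seen: its value is ≠ ccus, the loop returns none
      have hsome : (seen.get? e).isSome := by
        rwa [← PySem.Dict.contains_eq_isSome_get?]
      rcases Option.isSome_iff_exists.mp hsome with ⟨v, hvv⟩
      have hne : v ≠ ccus := hv e (by simp) v hvv
      have : pvAStep ccus (some seen) e = none := by
        simp [pvAStep, hvv, hne]
      simp [List.foldl_cons, this, pvAStep_none, hc]
    · -- e fresh: inserted, loop continues
      have hget : seen.get? e = none := by
        rcases h : seen.get? e with _ | v
        · rfl
        · exact absurd (by rw [PySem.Dict.contains_eq_isSome_get?, h]; rfl) hc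
      have hstep : pvAStep ccus (some seen) e = some (seen.insert e ccus) := by
        simp [pvAStep, hget]
      have hv' : ∀ e' ∈ l, ∀ v, (seen.insert e ccus).get? e' = some v → v ≠ ccus := by
        intro e' he' v hvv
        have hne : e' ≠ e := fun h => he (h ▸ he')
        rw [PySem.Dict.get?_insert_of_ne seen ccus hne] at hvv
        exact hv e' (by simp [he']) v hvv
      have hcont : ∀ e' ∈ l, (seen.insert e ccus).contains e' = seen.contains e' := by
        intro e' he'
        have hne : e' ≠ e := fun h => he (h ▸ he')
        simp [PySem.Dict.contains_insert, hne]
      rw [List.foldl_cons, hstep, ih (seen.insert e ccus) hnd' hv']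
      have hall : (l.all fun e' => !(seen.insert e ccus).contains e') =
          (l.all fun e' => !seen.contains e') := by
        apply Bool.eq_iff_iff.mpr
        simp only [List.all_eq_true]
        exact ⟨fun h e' he' => by rw [← hcont e' he']; exact h e' he',
               fun h e' he' => by rw [hcont e' he']; exact h e' he'⟩
      simp [hall, hc, List.foldl_cons]

lemma pvMain (rest : List (String × List String)) (seen : PySem.Dict String String)
    (union : PySem.Set String) (total : Int)
    (hnd : (rest.map Prod.fst).Nodup)
    (hvals : ∀ p ∈ rest, ∀ v ∈ seen.values, v ≠ p.1)
    (hkeys : ∀ x, seen.contains x = true ↔ x ∈ union)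
    (hund : union.Nodup)
    (htot : total = (union.length : Int)) :
    pvAOuter rest seen = pvBGo rest union total := by
  induction rest generalizing seen union total with
  | nil => rfl
  | cons p rest ih =>
    obtain ⟨ccus, es⟩ := p
    rcases List.nodup_cons.mp hnd with ⟨hccus, hnd'⟩
    set l : List String := PySem.Set.ofList es with hl
    have hlnd : l.Nodup := PySem.Set.nodup_ofList es
    -- A's inner loop preconditions
    have hv : ∀ e ∈ l, ∀ v, seen.get? e = some v → v ≠ ccus := by
      intro e _ v hvv
      have : v ∈ seen.values := by
        have := PySem.Dict.mem_items_of_get?_eq_some seen hvv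
        simpa [PySem.Dict.values] using List.mem_map_of_mem (f := Prod.snd) this
      exact hvals (ccus, es) (by simp) v this
    rw [pvAOuter, pvAInner ccus l seen hlnd hv]
    -- B's cardinality test
    have hunion : PySem.Set.union union l = union ++ l.filter (fun y => !(PySem.Set.contains union y)) := by
      rw [PySem.Set.union, PySem.Set.update_eq_append_filter, PySem.Set.ofList_eq_self_of_nodup l hlnd]
    have hlen : PySem.Set.len (PySem.Set.union union l) =
        (union.length : Int) + ((l.filter (fun y => !(PySem.Set.contains union y))).length : Int) := by
      rw [hunion]; simp [PySem.Set.len]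
    by_cases hall : (l.all fun e => !seen.contains e) = true
    · -- all elements fresh: both loops continue
      have hfresh : ∀ e ∈ l, ¬ e ∈ union := by
        intro e he hmem
        have h1 := List.all_eq_true.mp hall e he
        have h2 : seen.contains e = true := (hkeys e).mpr hmem
        rw [h2] at h1
        exact absurd h1 (by decide)
      have hfilter : l.filter (fun y => !(PySem.Set.contains union y)) = l := by
        apply List.filter_eq_self.mpr
        intro e he
        simpa using hfresh e he
      have hBeq : PySem.Set.len (PySem.Set.union union l) = total + PySem.Set.len l := by
        rw [hlen, hfilter, htot]; simp [PySem.Set.len]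
      rw [pvBGo]
      simp only [hall, if_true, ← hl, hBeq, ite_not]
      -- recurse with the updated states
      apply ih
      · exact hnd'
      · intro p hp v hvv
        rcases pvValues_foldl_insert ccus l seen v hvv with h | h
        · exact hvals p (by simp [hp]) v h
        · subst h
          intro hcc
          exact hccus (by rw [hcc]; exact List.mem_map.mpr ⟨p, hp, rfl⟩)
      · intro x
        have hk : (l.foldl (fun d e => d.insert e ccus) seen).keys = PySem.Set.update seen.keys l :=
          PySem.Dict.keys_foldl_insert l _ seen
        rw [PySem.Dict.contains_iff_mem_keys, hk, PySem.Set.mem_update, hunion, hfilter]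
        rw [← PySem.Dict.contains_iff_mem_keys, List.mem_append]
        constructor
        · rintro (h | h)
          · exact Or.inl ((hkeys x).mp h)
          · exact Or.inr h
        · rintro (h | h)
          · exact Or.inl ((hkeys x).mpr h)
          · exact Or.inr h
      · rw [hunion, hfilter]
        rw [List.nodup_append]
        refine ⟨hund, hlnd, ?_⟩
        intro a ha b hb hab
        exact hfresh b hb (hab ▸ ha)
      · rw [htot, hunion, hfilter]
        simp [PySem.Set.len]
    · -- overlap: A returns False; B's cardinality check fires
      have hallf : (l.all fun e => !seen.contains e) = false := Bool.eq_false_iff.mpr hall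
      have hexists : ∃ e ∈ l, e ∈ union := by
        rcases List.all_eq_false.mp hallf with ⟨e, he, hne⟩
        have h2 : seen.contains e = true := by
          rcases Bool.eq_false_or_eq_true (seen.contains e) with hh | hh
          · exact hh
          · exact absurd (by rw [hh]; decide) hne
        exact ⟨e, he, (hkeys e).mp h2⟩
      have hfl : (l.filter (fun y => !(PySem.Set.contains union y))).length < l.length := by
        rcases hexists with ⟨e, he, hmem⟩
        apply List.length_filter_lt_length_iff_exists.mpr
        exact ⟨e, he, by simpa using hmem⟩
      have hBne : PySem.Set.len (PySem.Set.union union l) ≠ total + PySem.Set.len l := by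
        rw [hlen, htot]
        simp only [PySem.Set.len]
        intro hcontra
        omega
      rw [pvBGo]
      simp only [← hl]
      rw [if_pos hBne, hallf]
      simp

-- ===== VERDICT (by name: the statement is the Claim_ definition above) =====
theorem em_map_is_partition_py_spec : Claim_equal_em_map_is_partition_py := by
  intro emap _ hpre
  unfold Spec_em_map_is_partition_py em_map_is_partition_py em_map_is_partition_py_alt
  exact pvMain emap PySem.Dict.empty PySem.Set.empty 0 hpre
    (by intro p _ v hv; simp [PySem.Dict.values, PySem.Dict.empty] at hv)
    (by intro x; simp [PySem.Dict.contains_empty, PySem.Set.empty])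
    (by simp [PySem.Set.empty])
    (by simp [PySem.Set.empty])
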